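-- pv_equiv track=rewrite | github.com/Veerhan-glitch/NLP | Backup/Q3_3/part3.py | extract_spans
-- ===== SOURCE A (Python) =====
-- def extract_spans(labels):
--     spans = set()
--     i = 0
--     while i < len(labels):
--         if labels[i] == "B-LOC":
--             j = i + 1
--             while j < len(labels) and labels[j] == "I-LOC":
--                 j += 1
--             spans.add((i, j))
--             i = j
--         else:
--             i += 1
--     return spans
-- ===== SOURCE B (Python) =====
-- def extract_spans(labels):
--     spans = set()
--     start = None
--     for idx, lab in enumerate(labels):
--         if lab == "B-LOC":
--             if start is not None:
--                 spans.add((start, idx))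
--             start = idx
--         elif lab != "I-LOC":
--             if start is not None:
--                 spans.add((start, idx))
--                 start = None
--     if start is not None:
--         spans.add((start, len(labels)))
--     return spans
-- ===== Notes on version B (the rewrite author's own statement) =====
-- stated objective: simpler
-- what changed: Replaced A's nested while-loops with index jumping (inner scan to find each span's end) by a single forward for-loop over enumerate(labels) that maintains one state variable `start` (the open span's start or None) and flushes the open span at each boundary and at the end.
import Mathlib
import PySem

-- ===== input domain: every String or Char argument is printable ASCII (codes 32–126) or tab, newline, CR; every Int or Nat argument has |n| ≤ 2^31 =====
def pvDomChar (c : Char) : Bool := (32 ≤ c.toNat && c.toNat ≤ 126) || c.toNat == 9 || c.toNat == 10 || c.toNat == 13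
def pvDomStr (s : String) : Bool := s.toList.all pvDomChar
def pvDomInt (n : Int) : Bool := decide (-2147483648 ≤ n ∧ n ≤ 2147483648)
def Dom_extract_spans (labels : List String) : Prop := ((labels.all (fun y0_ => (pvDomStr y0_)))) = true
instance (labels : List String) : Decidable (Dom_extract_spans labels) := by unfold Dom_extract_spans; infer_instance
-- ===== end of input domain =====

-- B changes the decomposition (one forward pass with an open-span state instead of A's
-- nested while-loops with index jumping); same O(n) cost, simpler control flow.

-- ===== PORT A =====
-- inner while:  j advances while j < len(labels) and labels[j] == "I-LOC"
def pvWhileJ (labels : List String) (j : Nat) : Nat :=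
  if j < labels.length ∧ labels.getD j "" = "I-LOC" then pvWhileJ labels (j + 1) else j
termination_by labels.length - j
decreasing_by omega

theorem pvWhileJ_ge (labels : List String) (j : Nat) : j ≤ pvWhileJ labels j := by
  unfold pvWhileJ
  split
  · exact le_trans (Nat.le_succ j) (pvWhileJ_ge labels (j + 1))
  · exact le_refl j
termination_by labels.length - j
decreasing_by omega

-- outer while over i
def pvLoopA (labels : List String) (spans : PySem.Set (Int × Int)) (i : Nat) :
    PySem.Set (Int × Int) :=
  if h : i < labels.length then
    if labels.getD i "" = "B-LOC" then
      let j := pvWhileJ labels (i + 1)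
      pvLoopA labels (PySem.Set.add spans ((i : Int), (j : Int))) j
    else pvLoopA labels spans (i + 1)
  else spans
termination_by labels.length - i
decreasing_by
  · have := pvWhileJ_ge labels (i + 1); omega
  · omega

def extract_spans (labels : List String) : List (Int × Int) :=
  pvLoopA labels PySem.Set.empty 0

-- ===== PORT B =====
-- one step of the for-loop over enumerate(labels): state is (spans, start)
def pvStepB (st : PySem.Set (Int × Int) × Option Int) (p : Int × String) :
    PySem.Set (Int × Int) × Option Int :=
  if p.2 = "B-LOC" then
    match st.2 with
    | some s => (PySem.Set.add st.1 (s, p.1), some p.1)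
    | none => (st.1, some p.1)
  else if p.2 ≠ "I-LOC" then
    match st.2 with
    | some s => (PySem.Set.add st.1 (s, p.1), none)
    | none => st
  else st

def pvFinishB (n : Int) (st : PySem.Set (Int × Int) × Option Int) : PySem.Set (Int × Int) :=
  match st.2 with
  | some s => PySem.Set.add st.1 (s, n)
  | none => st.1

def extract_spans_alt (labels : List String) : List (Int × Int) :=
  pvFinishB (labels.length : Int)
    ((PySem.List.enumerate labels 0).foldl pvStepB (PySem.Set.empty, none))

-- ===== PRECONDITION & SPEC =====
def Spec_extract_spans (labels : List String) (out : List (Int × Int)) : Prop := out = extract_spans_alt labels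
instance (labels : List String) (out : List (Int × Int)) : Decidable (Spec_extract_spans labels out) := by unfold Spec_extract_spans; infer_instance

-- ===== CLAIM (what is proved, stated in full; the proofs are below) =====
def Claim_equal_extract_spans : Prop := ∀ (labels : List String), Dom_extract_spans labels → Spec_extract_spans labels (extract_spans labels)

-- ===== LEMMAS AND PROOFS =====

-- pvWhileJ stays within the list and stops at a non-"I-LOC" label
theorem pvWhileJ_le_len (labels : List String) (j : Nat) (h : j ≤ labels.length) :
    pvWhileJ labels j ≤ labels.length := by
  unfold pvWhileJ
  split
  · exact pvWhileJ_le_len labels (j + 1) (by omega)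
  · exact h
termination_by labels.length - j
decreasing_by omega

theorem pvWhileJ_stop (labels : List String) (j : Nat)
    (h : pvWhileJ labels j < labels.length) :
    labels.getD (pvWhileJ labels j) "" ≠ "I-LOC" := by
  by_cases hc : j < labels.length ∧ labels.getD j "" = "I-LOC"
  · rw [pvWhileJ, if_pos hc] at h ⊢
    exact pvWhileJ_stop labels (j + 1) h
  · rw [pvWhileJ, if_neg hc] at h ⊢
    intro hI
    exact hc ⟨h, hI⟩
termination_by labels.length - j
decreasing_by omega

theorem pvWhileJ_run (labels : List String) (j k : Nat)
    (h1 : j ≤ k) (h2 : k < pvWhileJ labels j) :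
    labels.getD k "" = "I-LOC" := by
  unfold pvWhileJ at h2
  split at h2
  · rename_i hc
    rcases Nat.eq_or_lt_of_le h1 with rfl | hlt
    · exact hc.2
    · exact pvWhileJ_run labels (j + 1) k hlt h2
  · omega
termination_by labels.length - j
decreasing_by omega

-- fold step over the tail starting at index i, as a function of i
def pvFoldFrom (labels : List String) (st : PySem.Set (Int × Int) × Option Int) (i : Nat) :
    PySem.Set (Int × Int) × Option Int :=
  (PySem.List.enumerate (labels.drop i) (i : Int)).foldl pvStepB st

theorem pvFoldFrom_past (labels : List String) (st : PySem.Set (Int × Int) × Option Int)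
    (i : Nat) (h : labels.length ≤ i) : pvFoldFrom labels st i = st := by
  simp [pvFoldFrom, List.drop_eq_nil_of_le h]

theorem pvFoldFrom_cons (labels : List String) (st : PySem.Set (Int × Int) × Option Int)
    (i : Nat) (h : i < labels.length) :
    pvFoldFrom labels st i = pvFoldFrom labels (pvStepB st ((i : Int), labels.getD i "")) (i + 1) := by
  have hd : labels.drop i = labels.getD i "" :: labels.drop (i + 1) := by
    rw [List.getD_eq_getElem labels "" h]
    exact (List.drop_eq_getElem_cons h)
  simp [pvFoldFrom, hd, PySem.List.enumerate_cons, Nat.cast_add]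

-- an "I-LOC" run leaves an open-span state unchanged
theorem pvFoldFrom_run (labels : List String) (sp : PySem.Set (Int × Int)) (s : Int)
    (i j : Nat) (hij : i ≤ j) (hj : j ≤ labels.length)
    (hrun : ∀ k, i ≤ k → k < j → labels.getD k "" = "I-LOC") :
    pvFoldFrom labels (sp, some s) i = pvFoldFrom labels (sp, some s) j := by
  rcases Nat.eq_or_lt_of_le hij with rfl | hlt
  · rfl
  · rw [pvFoldFrom_cons labels _ i (by omega)]
    have hI : labels.getD i "" = "I-LOC" := hrun i (le_refl i) hlt
    have hstep : pvStepB (sp, some s) ((i : Int), labels.getD i "") = (sp, some s) := by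
      rw [hI]; simp [pvStepB]
    rw [hstep]
    exact pvFoldFrom_run labels sp s (i + 1) j hlt hj
      (fun k hk1 hk2 => hrun k (by omega) hk2)
termination_by j - i

-- main invariant: A's outer loop equals B's fold-then-finish from the same point
theorem pvMain (labels : List String) (d i : Nat) (sp : PySem.Set (Int × Int))
    (hd : labels.length - i ≤ d) :
    pvLoopA labels sp i = pvFinishB (labels.length : Int) (pvFoldFrom labels (sp, none) i) := by
  induction d generalizing i sp with
  | zero =>
    have hle : labels.length ≤ i := by omega
    rw [pvFoldFrom_past labels _ i hle]
    unfold pvLoopA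
    simp [Nat.not_lt.mpr hle, pvFinishB]
  | succ d ih =>
    by_cases h : i < labels.length
    · rw [pvFoldFrom_cons labels _ i h]
      unfold pvLoopA
      rw [dif_pos h]
      by_cases hB : labels.getD i "" = "B-LOC"
      · rw [if_pos hB]
        have hstep : pvStepB (sp, none) ((i : Int), labels.getD i "") = (sp, some (i : Int)) := by
          rw [hB]; simp [pvStepB]
        rw [hstep]
        set j := pvWhileJ labels (i + 1) with hj
        have hji : i + 1 ≤ j := pvWhileJ_ge labels (i + 1)
        have hjlen : j ≤ labels.length := pvWhileJ_le_len labels (i + 1) (by omega)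
        rw [pvFoldFrom_run labels sp (i : Int) (i + 1) j hji hjlen
          (fun k hk1 hk2 => pvWhileJ_run labels (i + 1) k hk1 hk2)]
        -- closing the open span at j gives the same result as continuing closed
        have hclose : pvFinishB (labels.length : Int) (pvFoldFrom labels (sp, some (i : Int)) j)
            = pvFinishB (labels.length : Int)
                (pvFoldFrom labels (PySem.Set.add sp ((i : Int), (j : Int)), none) j) := by
          by_cases hjl : j < labels.length
          · have hnI : labels.getD j "" ≠ "I-LOC" := pvWhileJ_stop labels (i + 1) (hj ▸ hjl)
            rw [pvFoldFrom_cons labels _ j hjl, pvFoldFrom_cons labels _ j hjl]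
            by_cases hjB : labels.getD j "" = "B-LOC"
            · simp only [pvStepB, if_pos hjB]
            · simp only [pvStepB]
              rw [if_neg hjB, if_neg hjB, if_pos hnI, if_pos hnI]
          · have hje : j = labels.length := by omega
            rw [pvFoldFrom_past labels _ j (by omega), pvFoldFrom_past labels _ j (by omega)]
            simp [pvFinishB, hje]
        rw [hclose]
        exact ih j _ (by omega)
      · rw [if_neg hB]
        have hstep : pvStepB (sp, none) ((i : Int), labels.getD i "") = (sp, none) := by
          by_cases hI : labels.getD i "" = "I-LOC"
          · rw [hI]; simp [pvStepB]
          · simp only [pvStepB]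
            rw [if_neg hB, if_pos hI]
        rw [hstep]
        exact ih (i + 1) sp (by omega)
    · rw [pvFoldFrom_past labels _ i (by omega)]
      unfold pvLoopA
      simp [h, pvFinishB]

-- ===== VERDICT (by name: the statement is the Claim_ definition above) =====
theorem extract_spans_spec : Claim_equal_extract_spans := by
  intro labels _
  unfold Spec_extract_spans extract_spans extract_spans_alt
  have h := pvMain labels labels.length 0 PySem.Set.empty (by omega)
  rw [h]
  simp [pvFoldFrom]
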